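-- pv_equiv track=rewrite | github.com/fpkgvip/mariana-computer | tests/test_u01_stripe_ooo_reversal.py | _parse_eq_filter
-- ===== SOURCE A (Python) =====
-- def _parse_eq_filter(url: str, column: str) -> str | None:
--     marker = f"{column}=eq."
--     if marker not in url:
--         return None
--     tail = url.split(marker, 1)[1]
--     # cut at first & or ?
--     for term in ("&", "?"):
--         if term in tail:
--             tail = tail.split(term, 1)[0]
--     return tail
-- ===== SOURCE B (Python) =====
-- def _parse_eq_filter(url: str, column: str) -> str | None:
--     marker = f"{column}=eq."
--     pos = url.find(marker)
--     if pos == -1: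
--         return None
--     out = []
--     for ch in url[pos + len(marker):]:
--         if ch == '&' or ch == '?':
--             break
--         out.append(ch)
--     return "".join(out)
-- ===== Notes on version B (the rewrite author's own statement) =====
-- stated objective: alternative
-- what changed: Replaces the containment test plus two successive split() cuts with a single url.find for the marker followed by one forward character scan that stops at the first '&' or '?'.
import Mathlib
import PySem

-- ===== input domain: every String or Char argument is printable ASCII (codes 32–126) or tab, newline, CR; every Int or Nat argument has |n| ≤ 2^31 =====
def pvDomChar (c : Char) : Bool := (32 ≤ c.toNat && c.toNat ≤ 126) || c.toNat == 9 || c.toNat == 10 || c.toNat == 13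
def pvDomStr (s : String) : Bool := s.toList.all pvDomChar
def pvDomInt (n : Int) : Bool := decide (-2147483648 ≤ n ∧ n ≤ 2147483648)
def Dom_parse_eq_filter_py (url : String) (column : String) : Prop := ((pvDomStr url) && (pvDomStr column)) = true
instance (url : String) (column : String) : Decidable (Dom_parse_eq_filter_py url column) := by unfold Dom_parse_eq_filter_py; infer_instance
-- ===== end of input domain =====

-- B replaces the containment test plus two successive split() cuts with one find plus a single
-- forward character scan stopping at the first '&' or '?'; alternative decomposition, same cost.

-- ===== PORT A =====
-- marker = f"{column}=eq."; 'marker not in url' → return None;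
-- tail = url.split(marker, 1)[1]; for term in ("&","?"): if term in tail: tail = tail.split(term,1)[0]
def parse_eq_filter_py (url : String) (column : String) : Option String :=
  let marker := column.toList ++ "=eq.".toList
  if ¬ PySem.Chars.isIn marker url.toList then none
  else
    -- url.split(marker, 1)[1]: marker occurs in url, so index 1 always exists (getD default unreachable)
    let tail := (PySem.Chars.splitOnMax url.toList marker 1).getD 1 []
    let tail := [['&'], ['?']].foldl
      (fun t term => if PySem.Chars.isIn term t then (PySem.Chars.splitOnMax t term 1).getD 0 [] else t)
      tail
    some (String.ofList tail)

-- ===== PORT B =====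
-- the 'for ch in …: break/append' loop of Source B
def pvScanB : List Char → List Char
  | [] => []
  | c :: rest => if c = '&' || c = '?' then [] else c :: pvScanB rest

def parse_eq_filter_py_alt (url : String) (column : String) : Option String :=
  let marker := column.toList ++ "=eq.".toList
  let pos := PySem.Chars.find url.toList marker
  if pos = -1 then none
  else
    -- url[pos + len(marker):] with a nonnegative start is List.drop
    some (String.ofList (pvScanB (url.toList.drop (pos.toNat + marker.length))))

-- ===== PRECONDITION & SPEC =====
def Spec_parse_eq_filter_py (url : String) (column : String) (out : Option String) : Prop := out = parse_eq_filter_py_alt url column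
instance (url : String) (column : String) (out : Option String) : Decidable (Spec_parse_eq_filter_py url column out) := by unfold Spec_parse_eq_filter_py; infer_instance

-- ===== CLAIM (what is proved, stated in full; the proofs are below) =====
def Claim_equal_parse_eq_filter_py : Prop := ∀ (url : String) (column : String), Dom_parse_eq_filter_py url column → Spec_parse_eq_filter_py url column (parse_eq_filter_py url column)

-- ===== LEMMAS AND PROOFS =====

-- reference "split at the first occurrence of sep": none = sep does not occur
def pvSplitOnce (sep : List Char) : List Char → Option (List Char × List Char)
  | [] => none
  | c :: rest =>
      if sep.isPrefixOf (c :: rest) then some ([], (c :: rest).drop sep.length)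
      else (pvSplitOnce sep rest).map (fun p => (c :: p.1, p.2))

lemma pv_go0 (fuel : Nat) (sep l cur acc) :
    PySem.Chars.splitOnMax.go sep fuel 0 l cur acc = ((cur.reverse ++ l) :: acc).reverse := by
  cases fuel <;> cases l <;> simp [PySem.Chars.splitOnMax.go]

lemma pv_go1 (l : List Char) : ∀ (fuel : Nat), l.length < fuel → ∀ sep cur acc,
    PySem.Chars.splitOnMax.go sep fuel 1 l cur acc =
      match pvSplitOnce sep l with
      | none => ((cur.reverse ++ l) :: acc).reverse
      | some (a, b) => (b :: (cur.reverse ++ a) :: acc).reverse := by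
  induction l with
  | nil =>
      intro fuel hf sep cur acc
      cases fuel with
      | zero => omega
      | succ n => simp [PySem.Chars.splitOnMax.go, pvSplitOnce]
  | cons c rest ih =>
      intro fuel hf sep cur acc
      cases fuel with
      | zero => omega
      | succ n =>
        by_cases hp : sep.isPrefixOf (c :: rest)
        · simp [PySem.Chars.splitOnMax.go, hp, pvSplitOnce, pv_go0]
        · have := ih n (by simpa using Nat.lt_of_succ_lt_succ hf) sep (c :: cur) acc
          simp only [PySem.Chars.splitOnMax.go, hp, pvSplitOnce]
          rw [this]
          cases h : pvSplitOnce sep rest with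
          | none => simp
          | some p => cases p; simp

lemma pv_splitOnMax_one (l sep : List Char) :
    PySem.Chars.splitOnMax l sep 1 =
      match pvSplitOnce sep l with
      | none => [l]
      | some (a, b) => [a, b] := by
  unfold PySem.Chars.splitOnMax
  rw [if_neg (by norm_num)]
  show PySem.Chars.splitOnMax.go sep (l.length + 1) 1 l [] [] = _
  rw [pv_go1 l (l.length + 1) (Nat.lt_succ_self _) sep [] []]
  cases h : pvSplitOnce sep l with
  | none => simp
  | some p => cases p; simp

lemma pv_find_go (sep : List Char) (hne : sep ≠ []) :
    ∀ (l : List Char) (k : Nat), PySem.Chars.find.go sep l k =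
      match pvSplitOnce sep l with
      | none => -1
      | some (a, _) => ((k : Int) + a.length) := by
  intro l
  induction l with
  | nil =>
      intro k
      simp [PySem.Chars.find.go, pvSplitOnce, List.isEmpty_iff, hne]
  | cons c rest ih =>
      intro k
      by_cases hp : sep.isPrefixOf (c :: rest)
      · simp [PySem.Chars.find.go, hp, pvSplitOnce]
      · rw [show PySem.Chars.find.go sep (c :: rest) k = PySem.Chars.find.go sep rest (k + 1) by
          simp [PySem.Chars.find.go, hp]]
        rw [ih (k + 1)]
        simp only [pvSplitOnce, hp]
        cases h : pvSplitOnce sep rest with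
        | none => simp
        | some p => cases p; push_cast; simp; ring

lemma pv_find_eq (s sub : List Char) (hne : sub ≠ []) :
    PySem.Chars.find s sub =
      match pvSplitOnce sub s with
      | none => -1
      | some (a, _) => (a.length : Int) := by
  unfold PySem.Chars.find
  rw [pv_find_go sub hne s 0]
  cases h : pvSplitOnce sub s with
  | none => rfl
  | some p => cases p; simp

lemma pv_splitOnce_append {sep : List Char} : ∀ {l a b : List Char},
    pvSplitOnce sep l = some (a, b) → l = a ++ sep ++ b := by
  intro l
  induction l with
  | nil => intro a b h; simp [pvSplitOnce] at h
  | cons c rest ih =>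
      intro a b h
      by_cases hp : sep.isPrefixOf (c :: rest)
      · rw [pvSplitOnce, if_pos hp] at h
        obtain ⟨t, ht⟩ := List.isPrefixOf_iff_prefix.mp hp
        cases h
        simp only [List.nil_append]
        rw [← ht]; simp
      · rw [pvSplitOnce, if_neg hp] at h
        cases hr : pvSplitOnce sep rest with
        | none => simp [hr] at h
        | some p =>
            cases p with
            | mk a' b' =>
              simp [hr] at h
              obtain ⟨ha, hb⟩ := h
              subst hb
              rw [← ha]
              simp [ih hr]

-- A's single-delimiter cut, rewritten through pvSplitOnce
def pvCut (d : Char) (t : List Char) : List Char :=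
  match pvSplitOnce [d] t with
  | none => t
  | some (a, _) => a

lemma pv_cut_eq (d : Char) (t : List Char) :
    (if PySem.Chars.isIn [d] t then (PySem.Chars.splitOnMax t [d] 1).getD 0 [] else t) = pvCut d t := by
  unfold PySem.Chars.isIn
  rw [pv_find_eq t [d] (by simp), pv_splitOnMax_one]
  unfold pvCut
  cases h : pvSplitOnce [d] t with
  | none => simp
  | some p => cases p with | mk a b => simp

lemma pv_splitOnce_single_cons (d c : Char) (rest : List Char) :
    pvSplitOnce [d] (c :: rest) =
      if c = d then some ([], rest)
      else (pvSplitOnce [d] rest).map (fun p => (c :: p.1, p.2)) := by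
  rw [pvSplitOnce]
  by_cases h : c = d
  · subst h; simp [List.isPrefixOf]
  · simp [List.isPrefixOf, h, Ne.symm h]

lemma pv_cut_cons_ne (d c : Char) (rest : List Char) (h : c ≠ d) :
    pvCut d (c :: rest) = c :: pvCut d rest := by
  unfold pvCut
  rw [pv_splitOnce_single_cons d c rest, if_neg h]
  cases hr : pvSplitOnce [d] rest with
  | none => simp
  | some p => cases p; simp

lemma pv_cut_cons_self (d : Char) (rest : List Char) : pvCut d (d :: rest) = [] := by
  unfold pvCut
  rw [pv_splitOnce_single_cons d d rest, if_pos rfl]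

lemma pv_cuts_eq_scan (t : List Char) : pvCut '?' (pvCut '&' t) = pvScanB t := by
  induction t with
  | nil => simp [pvCut, pvSplitOnce, pvScanB]
  | cons c rest ih =>
      by_cases h1 : c = '&'
      · subst h1
        rw [pv_cut_cons_self, pvScanB]
        simp [pvCut, pvSplitOnce]
      · by_cases h2 : c = '?'
        · subst h2
          rw [pv_cut_cons_ne '&' '?' rest (by decide), pv_cut_cons_self, pvScanB]
          simp
        · rw [pv_cut_cons_ne '&' c rest h1, pv_cut_cons_ne '?' c (pvCut '&' rest) h2, ih, pvScanB]
          simp [h1, h2]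

-- ===== VERDICT (by name: the statement is the Claim_ definition above) =====
theorem parse_eq_filter_py_spec : Claim_equal_parse_eq_filter_py := by
  intro url column _
  unfold Spec_parse_eq_filter_py parse_eq_filter_py parse_eq_filter_py_alt
  have hne : column.toList ++ "=eq.".toList ≠ [] := by simp
  cases h : pvSplitOnce (column.toList ++ "=eq.".toList) url.toList with
  | none =>
      have hfind : PySem.Chars.find url.toList (column.toList ++ "=eq.".toList) = -1 := by
        rw [pv_find_eq _ _ hne, h]
      have hin : PySem.Chars.isIn (column.toList ++ "=eq.".toList) url.toList = false := by
        rw [PySem.Chars.isIn, hfind]; rfl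
      rw [if_pos (by rw [hin]; decide), if_pos (by rw [hfind])]
  | some p =>
      cases p with
      | mk a b =>
        have hfind : PySem.Chars.find url.toList (column.toList ++ "=eq.".toList) = (a.length : Int) := by
          rw [pv_find_eq _ _ hne, h]
        have hin : PySem.Chars.isIn (column.toList ++ "=eq.".toList) url.toList = true := by
          rw [PySem.Chars.isIn, hfind]
          simp only [bne_iff_ne, ne_eq]
          omega
        have hurl' : url.toList = (a ++ (column.toList ++ "=eq.".toList)) ++ b := by
          rw [pv_splitOnce_append h, List.append_assoc]
        have hdrop : url.toList.drop ((a.length : Int).toNat + (column.toList ++ "=eq.".toList).length) = b := by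
          rw [hurl',
            show (a.length : Int).toNat + (column.toList ++ "=eq.".toList).length
              = (a ++ (column.toList ++ "=eq.".toList)).length by simp]
          exact List.drop_left ..
        have hsplit : PySem.Chars.splitOnMax url.toList (column.toList ++ "=eq.".toList) 1 = [a, b] := by
          rw [pv_splitOnMax_one, h]
        have htail : (PySem.Chars.splitOnMax url.toList (column.toList ++ "=eq.".toList) 1).getD 1 [] = b := by
          rw [hsplit]; rfl
        rw [if_neg (by rw [hin]; decide), if_neg (by rw [hfind]; omega), htail, hfind, hdrop]
        simp only [List.foldl_cons, List.foldl_nil]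
        rw [pv_cut_eq '&' b, pv_cut_eq '?' (pvCut '&' b), pv_cuts_eq_scan b]
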